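-- pv_equiv track=rewrite | github.com/meower-media/server | src/util/regex.py | extract_mention
-- ===== SOURCE A (Python) =====
-- def extract_mention(text: str) -> str:
--     notify = ("!" not in text)
--     for char in [
--         "<",
--         ">",
--         "@",
--         "#",
--         "!"
--     ]:
--         text = text.replace(char, "")
--     return text, notify
-- ===== SOURCE B (Python) =====
-- def extract_mention(text: str) -> str:
--     # Span-copy: walk once with an index, and whenever a removed character is
--     # hit, append the clean slice text[start:i] accumulated since the last cut;
--     # notify is tracked as a flag flipped when '!' is seen during the same pass.
--     parts = []
--     start = 0
--     notify = True
--     for i, c in enumerate(text):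
--         if c in "<>@#!":
--             if c == "!":
--                 notify = False
--             parts.append(text[start:i])
--             start = i + 1
--     parts.append(text[start:])
--     return "".join(parts), notify
-- ===== Notes on version B (the rewrite author's own statement) =====
-- stated objective: alternative
-- what changed: Replaces five successive str.replace full-string scans with a single indexed span-copy pass: clean slices between removed characters are collected and joined, and notify is a flag flipped when '!' is encountered during that same pass.
import Mathlib
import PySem

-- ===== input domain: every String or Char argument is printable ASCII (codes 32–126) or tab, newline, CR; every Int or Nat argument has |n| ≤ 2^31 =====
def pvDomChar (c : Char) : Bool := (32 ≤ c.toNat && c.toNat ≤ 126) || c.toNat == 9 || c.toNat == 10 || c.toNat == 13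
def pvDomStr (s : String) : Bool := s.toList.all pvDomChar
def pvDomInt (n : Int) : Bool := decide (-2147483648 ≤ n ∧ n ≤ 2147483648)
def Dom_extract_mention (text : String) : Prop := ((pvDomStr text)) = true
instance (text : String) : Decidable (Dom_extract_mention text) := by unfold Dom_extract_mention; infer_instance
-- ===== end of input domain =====

-- B replaces A's five successive str.replace scans by one indexed span-copy pass that
-- joins the clean slices between removed characters, flipping the notify flag on '!'.

-- ===== PORT A =====
def extract_mention (text : String) : String × Bool :=
  let notify : Bool := !(PySem.Str.isIn "!" text)
  let text := ["<", ">", "@", "#", "!"].foldl (fun s ch => PySem.Str.replace s ch "") text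
  (text, notify)

-- ===== PORT B =====
-- loop body of Source B's 'for i, c in enumerate(text)'
def emStep (cs : List Char) (s : List (List Char) × Int × Bool) (ic : Int × Char) :
    List (List Char) × Int × Bool :=
  if PySem.Chars.isIn [ic.2] "<>@#!".toList then
    (s.1 ++ [PySem.List.slice cs (some s.2.1) (some ic.1)], ic.1 + 1,
     if ic.2 = '!' then false else s.2.2)
  else s

def extract_mention_alt (text : String) : String × Bool :=
  let cs := text.toList
  let st := (PySem.List.enumerate cs 0).foldl (emStep cs) ([], 0, true)
  (String.ofList (PySem.Chars.join [] (st.1 ++ [PySem.List.slice cs (some st.2.1) none])),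
   st.2.2)

-- ===== PRECONDITION & SPEC =====
def Spec_extract_mention (text : String) (out : String × Bool) : Prop := out = extract_mention_alt text
instance (text : String) (out : String × Bool) : Decidable (Spec_extract_mention text out) := by unfold Spec_extract_mention; infer_instance

-- ===== CLAIM (what is proved, stated in full; the proofs are below) =====
def Claim_equal_extract_mention : Prop := ∀ (text : String), Dom_extract_mention text → Spec_extract_mention text (extract_mention text)

-- ===== LEMMAS AND PROOFS =====

-- replace.go with a single-char needle and empty replacement is a filter (given enough fuel)
theorem replace_go_single (c : Char) : ∀ (fuel : Nat) (l acc : List Char), l.length ≤ fuel →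
    PySem.Chars.replace.go [c] [] fuel l acc = acc.reverse ++ l.filter (fun x => x ≠ c) := by
  intro fuel
  induction fuel with
  | zero => intro l acc h; cases l with
    | nil => simp [PySem.Chars.replace.go]
    | cons a t => simp at h
  | succ n ih =>
    intro l acc h
    cases l with
    | nil => simp [PySem.Chars.replace.go]
    | cons a t =>
      simp only [List.length_cons, Nat.succ_le_succ_iff] at h
      by_cases hc : a = c
      · subst hc
        have : List.isPrefixOf [a] (a :: t) = true := by simp [List.isPrefixOf]
        simp [PySem.Chars.replace.go, this, ih t acc h]
      · have : List.isPrefixOf [c] (a :: t) = false := by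
          simp [List.isPrefixOf]; exact fun hh => hc hh.symm
        simp only [PySem.Chars.replace.go, this]
        rw [if_neg (by simp), ih t (a :: acc) h]
        simp [hc]

theorem replace_single_eq_filter (s : List Char) (c : Char) :
    PySem.Chars.replace s [c] [] = s.filter (fun x => x ≠ c) := by
  have := replace_go_single c s.length s [] (le_refl _)
  simpa [PySem.Chars.replace] using this

theorem isIn_singleton (x : Char) (l : List Char) :
    PySem.Chars.isIn [x] l = l.contains x := by
  rcases h : l.contains x with _ | _
  · rw [PySem.Chars.isIn_eq_false_iff]
    intro hinf
    have hx : x ∈ l := hinf.subset (List.mem_singleton_self x)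
    simp [hx] at h
  · rw [PySem.Chars.isIn_iff_infix]
    obtain ⟨s, t, rfl⟩ := List.mem_iff_append.mp (by simpa using h)
    exact ⟨s, t, by simp⟩

-- the span-copy loop of B computes the filtered string and the notify flag
theorem emLoop_inv : ∀ (l cs : List Char) (parts : List (List Char)) (k start : Nat)
    (notify : Bool), cs.drop k = l → start ≤ k →
    (let st := (PySem.List.enumerate l (k : Int)).foldl (emStep cs) (parts, ((start : Nat) : Int), notify)
     ((st.1 ++ [PySem.List.slice cs (some st.2.1) none]).flatten, st.2.2))
    = (parts.flatten ++ (cs.drop start).take (k - start)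
        ++ l.filter (fun c => !(PySem.Chars.isIn [c] "<>@#!".toList)),
       notify && !l.contains '!') := by
  intro l
  induction l with
  | nil =>
    intro cs parts k start notify hdrop hle
    have hlen : cs.length ≤ k := by
      have := congrArg List.length hdrop; simp at this; omega
    have htake : (cs.drop start).take (k - start) = cs.drop start := by
      apply List.take_of_length_le; simp; omega
    simp [PySem.List.enumerate_nil, PySem.List.slice_from_natCast, htake]
  | cons c l ih =>
    intro cs parts k start notify hdrop hle
    have hk : k < cs.length := by
      by_contra h
      have hnil : cs.drop k = [] := List.drop_eq_nil_of_le (by omega)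
      rw [hnil] at hdrop; exact absurd hdrop (by simp)
    have hdrop' : cs.drop (k + 1) = l := by
      have h2 : (cs.drop k).tail = l := by rw [hdrop]; rfl
      rwa [List.tail_drop] at h2
    have hcast : ((k : Int) + 1) = (((k + 1 : Nat)) : Int) := by push_cast; ring
    rw [PySem.List.enumerate_cons, List.foldl_cons]
    by_cases hc : PySem.Chars.isIn [c] "<>@#!".toList = true
    all_goals rw [show ("<>@#!".toList) = ['<', '>', '@', '#', '!'] from by decide] at hc
    · have hstep : emStep cs (parts, ((start : Nat) : Int), notify) ((k : Int), c)
          = (parts ++ [PySem.List.slice cs (some ((start : Nat) : Int)) (some ((k : Nat) : Int))],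
             (((k + 1 : Nat) : Int)), if c = '!' then false else notify) := by
        simp only [emStep, show ("<>@#!".toList) = ['<', '>', '@', '#', '!'] from by decide, hc,
          if_true, hcast]
      rw [hstep, hcast, ih cs _ (k + 1) (k + 1) _ hdrop' (le_refl _)]
      have hsl : PySem.List.slice cs (some ((start : Nat) : Int)) (some ((k : Nat) : Int))
          = (cs.drop start).take (k - start) := PySem.List.slice_natCast cs start k
      by_cases hb : c = '!'
      · subst hb
        simp [hsl, hc, show ("<>@#!".toList) = ['<', '>', '@', '#', '!'] from by decide]
      · have hbe : ('!' == c) = false := by simp; exact fun h => hb h.symm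
        have hcl : (c :: l).contains '!' = l.contains '!' := by
          rw [List.contains_cons, hbe, Bool.false_or]
        have hdc : ('!' = c) = False := by simp; exact fun h => hb h.symm
        simp [hsl, hc, hb, hdc,
          show ("<>@#!".toList) = ['<', '>', '@', '#', '!'] from by decide]
    · have hstep : emStep cs (parts, ((start : Nat) : Int), notify) ((k : Int), c)
          = (parts, ((start : Nat) : Int), notify) := by
        simp only [emStep, show ("<>@#!".toList) = ['<', '>', '@', '#', '!'] from by decide, hc,
          if_false, Bool.false_eq_true]
      rw [hstep, hcast, ih cs parts (k + 1) start notify hdrop' (by omega)]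
      have hget : (cs.drop start)[k - start]? = some c := by
        rw [← List.head?_drop, List.drop_drop]
        rw [show start + (k - start) = k by omega, hdrop]
        rfl
      have htake : (cs.drop start).take (k + 1 - start)
          = (cs.drop start).take (k - start) ++ [c] := by
        rw [show k + 1 - start = (k - start) + 1 by omega, List.take_add_one, hget]
        rfl
      have hnb : c ≠ '!' := by
        intro h; subst h; exact hc (by decide)
      have hbe : ('!' == c) = false := by simp; exact fun h => hnb h.symm
      have hcl : (c :: l).contains '!' = l.contains '!' := by
        rw [List.contains_cons, hbe, Bool.false_or]
      have hdc : ('!' = c) = False := by simp; exact fun h => hnb h.symm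
      simp [htake, List.filter_cons, hc, hcl, hdc,
        show ("<>@#!".toList) = ['<', '>', '@', '#', '!'] from by decide]

theorem join_nil_flatten : ∀ (ps : List (List Char)), PySem.Chars.join [] ps = ps.flatten := by
  intro ps
  rw [show PySem.Chars.join ([] : List Char) ps = (List.intersperse [] ps).flatten from by
    simp [PySem.Chars.join, List.intercalate]]
  induction ps with
  | nil => rfl
  | cons p ps ih =>
    cases ps with
    | nil => simp
    | cons q ps => simp_all [List.intersperse]

theorem extract_mention_spec : Claim_equal_extract_mention := by
  intro text _
  unfold Spec_extract_mention extract_mention extract_mention_alt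
  have hmain := emLoop_inv text.toList text.toList [] 0 0 true rfl (le_refl _)
  simp only [Nat.cast_zero, List.drop_zero, Nat.sub_zero, List.take_zero, List.flatten_nil,
    List.nil_append, Bool.true_and] at hmain
  have h1 := congrArg Prod.fst hmain
  have h2 := congrArg Prod.snd hmain
  simp only [] at h1 h2
  dsimp only
  rw [join_nil_flatten, h1, h2]
  simp only [List.foldl_cons, List.foldl_nil, PySem.Str.replace]
  simp only [show "<".toList = ['<'] from by decide, show ">".toList = ['>'] from by decide,
    show "@".toList = ['@'] from by decide, show "#".toList = ['#'] from by decide,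
    show "!".toList = ['!'] from by decide, show "".toList = ([] : List Char) from by decide,
    replace_single_eq_filter]
  refine Prod.ext ?_ ?_
  · refine congrArg String.ofList ?_
    simp only [String.toList_ofList]
    rw [List.filter_filter, List.filter_filter, List.filter_filter, List.filter_filter]
    apply List.filter_congr
    intro x _
    rw [show "<>@#!".toList = ['<', '>', '@', '#', '!'] from by decide, isIn_singleton]
    by_cases h1 : x = '<' <;> by_cases h2 : x = '>' <;> by_cases h3 : x = '@' <;>
      by_cases h4 : x = '#' <;> by_cases h5 : x = '!' <;> simp_all
  · rw [show PySem.Str.isIn "!" text = PySem.Chars.isIn "!".toList text.toList from by simp,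
      show "!".toList = ['!'] from by decide, isIn_singleton]
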